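-- pv_equiv track=rewrite | github.com/Anisc19/TP-TL | TPs[NEW]/Serie01/Serie01-Exo1-Act03.py | symmetric_browse
-- ===== SOURCE A (Python) =====
-- def symmetric_browse(L):
--     L12 = []
--     j = len(L) - 1
--     for i in range(0,len(L)):
--         if(i<=j):
--             L12.append(L[i])
--             j = j - 1
--     return L12
-- ===== SOURCE B (Python) =====
-- def symmetric_browse(L):
--     return L[:(len(L) + 1) // 2]
-- ===== Notes on version B (the rewrite author's own statement) =====
-- stated objective: simpler
-- what changed: Replaces the two-pointer loop (append L[i] while i <= j, decrementing j) with a closed-form slice of the first ceil(n/2) elements, L[:(len(L)+1)//2].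
import Mathlib
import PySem

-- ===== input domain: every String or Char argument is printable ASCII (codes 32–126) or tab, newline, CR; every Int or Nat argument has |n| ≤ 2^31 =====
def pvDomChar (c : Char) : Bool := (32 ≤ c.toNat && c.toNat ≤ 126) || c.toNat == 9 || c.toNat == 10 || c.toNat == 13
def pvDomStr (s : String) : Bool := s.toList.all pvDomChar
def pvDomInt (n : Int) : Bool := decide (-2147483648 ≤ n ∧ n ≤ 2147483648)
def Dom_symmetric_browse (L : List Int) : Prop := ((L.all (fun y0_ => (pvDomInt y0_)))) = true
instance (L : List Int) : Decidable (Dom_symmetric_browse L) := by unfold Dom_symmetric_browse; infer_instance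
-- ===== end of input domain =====

-- B replaces A's two-pointer loop by the closed-form slice L[:(len(L)+1)//2] (simpler).

-- ===== PORT A =====
-- the loop body: if i <= j append L[i] (always in range here) and decrement j
def symBrowseStep (L : List Int) (st : List Int × Int) (i : Int) : List Int × Int :=
  if i ≤ st.2 then (st.1 ++ [PySem.List.pyGetD L i 0], st.2 - 1) else st

def symmetric_browse (L : List Int) : List Int :=
  ((PySem.List.pyRange 0 (L.length : Int) 1).foldl (symBrowseStep L)
    ([], (L.length : Int) - 1)).1

-- ===== PORT B =====
def symmetric_browse_alt (L : List Int) : List Int :=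
  PySem.List.slice L none (some (PySem.Int.floordiv ((L.length : Int) + 1) 2))

-- ===== PRECONDITION & SPEC =====
def Spec_symmetric_browse (L : List Int) (out : List Int) : Prop := out = symmetric_browse_alt L
instance (L : List Int) (out : List Int) : Decidable (Spec_symmetric_browse L out) := by unfold Spec_symmetric_browse; infer_instance

-- ===== CLAIM (what is proved, stated in full; the proofs are below) =====
def Claim_equal_symmetric_browse : Prop := ∀ (L : List Int), Dom_symmetric_browse L → Spec_symmetric_browse L (symmetric_browse L)

-- ===== LEMMAS AND PROOFS =====

-- once i > j the state never changes again (j fixed, subsequent i only larger)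
lemma foldl_dead (L : List Int) (l : List Int) (acc : List Int) (j : Int)
    (h : ∀ i ∈ l, ¬ i ≤ j) :
    l.foldl (symBrowseStep L) (acc, j) = (acc, j) := by
  induction l with
  | nil => rfl
  | cons x xs ih =>
    simp only [List.foldl_cons, symBrowseStep, if_neg (h x (by simp))]
    exact ih (fun i hi => h i (by simp [hi]))

lemma loop_active (L : List Int) : ∀ (k : Nat) (a : Nat) (acc : List Int),
    a + k = L.length →
    ((PySem.List.pyRange (a : Int) (L.length : Int) 1).foldl (symBrowseStep L)
        (acc, (L.length : Int) - 1 - a)).1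
      = acc ++ (L.drop a).take ((L.length + 1) / 2 - a) := by
  intro k
  induction k with
  | zero =>
    intro a acc ha
    rw [PySem.List.pyRange_one_eq_nil (by omega)]
    simp
    omega
  | succ k ih =>
    intro a acc ha
    rw [PySem.List.pyRange_one_cons (by omega : (a : Int) < (L.length : Int))]
    by_cases h : (a : Int) ≤ (L.length : Int) - 1 - a
    · simp only [List.foldl_cons, symBrowseStep, if_pos h]
      have hlt : a < L.length := by omega
      have hget : PySem.List.pyGetD L (a : Int) 0 = L[a] := by
        simp [PySem.List.pyGetD_natCast, hlt]
      have hc : ((a : Int) + 1) = ((a + 1 : Nat) : Int) := by push_cast; ring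
      have hj : (L.length : Int) - 1 - a - 1 = (L.length : Int) - 1 - (a + 1 : Nat) := by
        push_cast; ring
      rw [hget, hc, hj, ih (a + 1) (acc ++ [L[a]]) (by omega)]
      have hdrop : L.drop a = L[a] :: L.drop (a + 1) := List.drop_eq_getElem_cons hlt
      have htk : (L.length + 1) / 2 - a = ((L.length + 1) / 2 - (a + 1)) + 1 := by omega
      rw [hdrop, htk, List.take_succ_cons, List.append_assoc]
      rfl
    · rw [List.foldl_cons, symBrowseStep, if_neg h]
      rw [foldl_dead L _ acc ((L.length : Int) - 1 - a)
        (fun i hi => by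
          have := (PySem.List.mem_pyRange_one.mp hi).1
          omega)]
      have : (L.length + 1) / 2 - a = 0 := by omega
      simp [this]

lemma symmetric_browse_eq_take (L : List Int) :
    symmetric_browse L = L.take ((L.length + 1) / 2) := by
  have := loop_active L L.length 0 [] (by omega)
  simpa [symmetric_browse] using this

lemma alt_eq_take (L : List Int) :
    symmetric_browse_alt L = L.take ((L.length + 1) / 2) := by
  unfold symmetric_browse_alt
  have hfd : PySem.Int.floordiv ((L.length : Int) + 1) 2 = (((L.length + 1) / 2 : Nat) : Int) := by
    simp [PySem.Int.floordiv, Int.fdiv_eq_ediv]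
  rw [hfd, PySem.List.slice_to_natCast]

-- ===== VERDICT (by name: the statement is the Claim_ definition above) =====
theorem symmetric_browse_spec : Claim_equal_symmetric_browse := by
  intro L _
  unfold Spec_symmetric_browse
  rw [symmetric_browse_eq_take, alt_eq_take]
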